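-- pv_equiv track=rewrite | github.com/ozkayas/leetcode_solutions | 9999-A2Z-OA/Total Execution Time.py | totalExecutionTime
-- ===== SOURCE A (Python) =====
-- from typing import List
-- from collections import defaultdict
-- import math
--
-- def totalExecutionTime(execution:List[int]) -> int:
--
--     totalTime = 0
--     # frequency list
--     freq = defaultdict(int)
--     for e in execution:
--         freq[e] += 1
--
--     for f in freq.keys():
--         executionTime = f
--         for i in range(freq[f]):
--             totalTime += executionTime
--             executionTime = math.ceil(executionTime/2)
--
--
--     return totalTime
-- ===== SOURCE B (Python) =====
-- from typing import List
-- from collections import Counter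
--
-- def totalExecutionTime(execution: List[int]) -> int:
--     total = 0
--     for x, c in Counter(execution).items():
--         # halve until the sequence reaches its fixed point (0 or 1), then
--         # the remaining c occurrences each contribute exactly x
--         while c > 0 and x != (x + 1) // 2:
--             total += x
--             x = (x + 1) // 2
--             c -= 1
--         total += c * x
--     return total
-- ===== Notes on version B (the rewrite author's own statement) =====
-- stated objective: alternative
-- what changed: Per distinct value (Counter) B iterates the ceil-halving only until it reaches its fixed point (0 or 1) and adds remaining_count * fixed_point, instead of A's one halving step per occurrence; this does O(min(count, log M)) steps per distinct value.
import Mathlib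
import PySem

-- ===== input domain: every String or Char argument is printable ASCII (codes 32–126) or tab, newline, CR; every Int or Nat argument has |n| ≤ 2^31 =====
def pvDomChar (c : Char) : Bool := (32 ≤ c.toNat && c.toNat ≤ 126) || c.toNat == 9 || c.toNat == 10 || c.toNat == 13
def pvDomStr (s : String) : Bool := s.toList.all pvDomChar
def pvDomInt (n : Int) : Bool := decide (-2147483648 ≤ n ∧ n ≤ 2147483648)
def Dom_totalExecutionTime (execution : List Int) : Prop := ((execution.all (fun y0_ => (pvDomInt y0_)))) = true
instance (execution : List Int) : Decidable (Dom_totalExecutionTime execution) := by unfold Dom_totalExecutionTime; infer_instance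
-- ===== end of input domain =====

-- B stops the ceil-halving at its fixed point per distinct value instead of stepping once per occurrence.

-- ===== PORT A =====
-- math.ceil(e/2) is ported as floordiv (e+1) 2: exact, since for |e| ≤ 2^31 Python's
-- float e/2 is exact and ceil(e/2) = floor((e+1)/2) for integer e.
def totalExecutionTime (execution : List Int) : Int :=
  let freq := execution.foldl (fun d e => d.modify e 0 (· + 1)) (PySem.Dict.empty : PySem.Dict Int Int)
  freq.keys.foldl (fun totalTime f =>
    ((PySem.List.pyRange 0 (freq.getD f 0) 1).foldl
        (fun (st : Int × Int) _ => (st.1 + st.2, PySem.Int.floordiv (st.2 + 1) 2))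
        (totalTime, f)).1) 0

-- ===== PORT B =====
-- the while loop of Source B: state (x, c, total); terminates because c decreases
def pvAltInner (x : Int) (c : Int) (total : Int) : Int :=
  if c ≤ 0 ∨ x = PySem.Int.floordiv (x + 1) 2 then total + c * x
  else pvAltInner (PySem.Int.floordiv (x + 1) 2) (c - 1) (total + x)
termination_by c.toNat
decreasing_by omega

def totalExecutionTime_alt (execution : List Int) : Int :=
  (PySem.Dict.counter execution).items.foldl (fun total vc => pvAltInner vc.1 vc.2 total) 0

-- ===== PRECONDITION & SPEC =====
def Spec_totalExecutionTime (execution : List Int) (out : Int) : Prop := out = totalExecutionTime_alt execution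
instance (execution : List Int) (out : Int) : Decidable (Spec_totalExecutionTime execution out) := by unfold Spec_totalExecutionTime; infer_instance

-- ===== CLAIM (what is proved, stated in full; the proofs are below) =====
def Claim_equal_totalExecutionTime : Prop := ∀ (execution : List Int), Dom_totalExecutionTime execution → Spec_totalExecutionTime execution (totalExecutionTime execution)

-- ===== LEMMAS AND PROOFS =====

-- a foldl that ignores the elements is an iterate of the step, counted by the length
theorem pv_foldl_ignore {α β : Type} (g : α → α) (l : List β) (init : α) :
    l.foldl (fun st _ => g st) init = g^[l.length] init := by
  induction l generalizing init with
  | nil => rfl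
  | cons b t ih => simp [List.foldl_cons, ih, Function.iterate_succ_apply]

-- A's inner step
def pvStep (st : Int × Int) : Int × Int := (st.1 + st.2, PySem.Int.floordiv (st.2 + 1) 2)

-- once x is a fixed point of ceil-halving it stays, contributing x each step
theorem pv_iter_fixed (x : Int) (hx : x = PySem.Int.floordiv (x + 1) 2) :
    ∀ (n : Nat) (t : Int), (pvStep^[n] (t, x)).1 = t + n * x := by
  intro n
  induction n with
  | zero => intro t; simp
  | succ m ih =>
    intro t
    rw [Function.iterate_succ_apply]
    show (pvStep^[m] (t + x, PySem.Int.floordiv (x + 1) 2)).1 = _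
    rw [← hx, ih]
    push_cast; ring

-- A's inner loop (n halving steps) equals B's while loop with budget n
theorem pv_inner_eq (n : Nat) : ∀ (x t : Int),
    (pvStep^[n] (t, x)).1 = pvAltInner x (n : Int) t := by
  induction n with
  | zero => intro x t; rw [pvAltInner]; simp
  | succ m ih =>
    intro x t
    rw [pvAltInner]
    by_cases hx : x = PySem.Int.floordiv (x + 1) 2
    · rw [if_pos (Or.inr hx), pv_iter_fixed x hx]
    · rw [if_neg (by push Not; exact ⟨by omega, hx⟩)]
      rw [Function.iterate_succ_apply]
      show (pvStep^[m] (t + x, PySem.Int.floordiv (x + 1) 2)).1 = _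
      rw [ih]
      norm_num

-- ===== VERDICT (by name: the statement is the Claim_ definition above) =====
theorem totalExecutionTime_spec : Claim_equal_totalExecutionTime := by
  intro execution _
  unfold Spec_totalExecutionTime totalExecutionTime totalExecutionTime_alt
  rw [← PySem.Dict.counter_eq_foldl]
  simp only [PySem.Dict.items_counter, PySem.Dict.keys_counter, PySem.Dict.getD_counter,
    List.foldl_map]
  apply PySem.List.foldl_congr_mem
  intro total f _
  show ((PySem.List.pyRange 0 ((execution.count f : Int)) 1).foldl
      (fun st _ => pvStep st) (total, f)).1 = pvAltInner f ((execution.count f : Int)) total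
  rw [pv_foldl_ignore pvStep, PySem.List.length_pyRange_one]
  have : (((execution.count f : Int) - 0).toNat : Int) = (execution.count f : Int) := by
    omega
  rw [pv_inner_eq, this]
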